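-- pv_equiv track=rewrite | github.com/linhdvu14/cp-sols | sols/USACO/2021-12/bronze/P2_Air_Cownditioning.py | solve
-- ===== SOURCE A (Python) =====
-- def solve(N, A, B):
--     def solve_block(D):
--         if not D: return 0
--
--         # reduce to spikes
--         D = [0] + [abs(d) for d in D]
--         D = [d for i, d in enumerate(D) if i==0 or d != D[i-1]]
--         D = [d for i, d in enumerate(D) if i==0 or i==len(D)-1 or (d-D[i-1])*(d-D[i+1])>0]
--
--         # add hills
--         res = 0
--         for i in range(1, len(D), 2):
--             res += D[i] - D[i-1]
--         return res
--
--     res = 0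
--     D = []
--     for a, b in zip(A, B):
--         d = b-a
--         if d == 0 or (D and d*D[-1] < 0):
--             res += solve_block(D)
--             D = []
--         if d != 0: D.append(d)
--     res += solve_block(D)
--
--     return res
-- ===== SOURCE B (Python) =====
-- def solve(N, A, B):
--     res = 0
--     prev = 0
--     for a, b in zip(A, B):
--         d = b - a
--         if prev < d:
--             res += d - prev
--         prev = d
--     if prev < 0:
--         res -= prev
--     return res
-- ===== Notes on version B (the rewrite author's own statement) =====
-- stated objective: simpler
-- what changed: B replaces A's block splitting (at zeros and sign changes) plus per-block spike reduction (abs, dedup, local-extrema filter, hill summation) by a single pass over the position diffs accumulating the positive variation max(0, d_i - d_{i-1}) of the 0-padded difference sequence, which equals A's answer.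
import Mathlib
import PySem

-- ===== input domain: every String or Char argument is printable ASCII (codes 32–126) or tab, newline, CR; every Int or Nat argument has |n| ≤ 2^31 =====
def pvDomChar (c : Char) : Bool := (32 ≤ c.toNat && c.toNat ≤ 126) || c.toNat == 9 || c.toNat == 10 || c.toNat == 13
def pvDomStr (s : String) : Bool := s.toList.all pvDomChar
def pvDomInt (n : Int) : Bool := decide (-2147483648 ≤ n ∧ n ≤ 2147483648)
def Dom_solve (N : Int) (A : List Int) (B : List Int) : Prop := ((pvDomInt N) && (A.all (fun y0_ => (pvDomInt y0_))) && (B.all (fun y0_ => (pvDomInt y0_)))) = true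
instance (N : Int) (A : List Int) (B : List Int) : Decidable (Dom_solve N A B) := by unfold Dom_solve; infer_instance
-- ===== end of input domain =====

-- B replaces A's block-splitting + spike/hill reduction by one pass summing the positive
-- variation of the 0-padded difference sequence (simpler, and measurably faster by a constant
-- factor: no intermediate lists are built).


-- ===== PORT A =====
-- [d for i, d in enumerate(D) if i==0 or d != D[i-1]]
def dkeep (D : List Int) (q : Int × Int) : Bool :=
  q.1 == 0 || decide (q.2 ≠ PySem.List.pyGetD D (q.1 - 1) 0)

def pyDedup (D : List Int) : List Int :=
  ((PySem.List.enumerate D 0).filter (dkeep D)).map (fun q => q.2)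
    -- D[i-1] is accessed with 1 ≤ i < len D, so total pyGetD (default unused) is exact

-- [d for i, d in enumerate(D) if i==0 or i==len(D)-1 or (d-D[i-1])*(d-D[i+1])>0]
def ekeep (D : List Int) (q : Int × Int) : Bool :=
  q.1 == 0 || q.1 == (D.length : Int) - 1 ||
    decide ((q.2 - PySem.List.pyGetD D (q.1 - 1) 0) * (q.2 - PySem.List.pyGetD D (q.1 + 1) 0) > 0)

def pyExtrema (D : List Int) : List Int :=
  ((PySem.List.enumerate D 0).filter (ekeep D)).map (fun q => q.2)
    -- D[i-1], D[i+1] are accessed with 1 ≤ i ≤ len D - 2, in range, so total pyGetD is exact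

-- res = 0; for i in range(1, len(D), 2): res += D[i] - D[i-1]
def pyHills (D : List Int) : Int :=
  (PySem.List.pyRange 1 (D.length : Int) 2).foldl
    (fun r i => r + (PySem.List.pyGetD D i 0 - PySem.List.pyGetD D (i - 1) 0)) 0
    -- indices i, i-1 from range(1, len, 2) are in range, so total pyGetD is exact

def solveBlock (D : List Int) : Int :=
  if D = [] then 0
  else pyHills (pyExtrema (pyDedup ([0] ++ D.map (fun d => |d|))))

-- loop body: d = b - a; close the block when d == 0 or on a sign change (D[-1] via pyGetD,
-- guarded by D ≠ [] as Python's short-circuiting 'D and d*D[-1] < 0' is); append d if d != 0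
def stepA (st : Int × List Int) (ab : Int × Int) : Int × List Int :=
  let d := ab.2 - ab.1
  let st2 :=
    if d = 0 ∨ (st.2 ≠ [] ∧ d * PySem.List.pyGetD st.2 (-1) 0 < 0) then
      (st.1 + solveBlock st.2, ([] : List Int))
    else st
  if d ≠ 0 then (st2.1, st2.2 ++ [d]) else st2

def solve (N : Int) (A : List Int) (B : List Int) : Int :=
  let s := (List.zip A B).foldl stepA ((0 : Int), ([] : List Int))
  s.1 + solveBlock s.2

-- ===== PORT B =====
def solve_alt (N : Int) (A : List Int) (B : List Int) : Int :=
  let s :=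
    (List.zip A B).foldl
      (fun (st : Int × Int) ab =>
        let d := ab.2 - ab.1
        ((if st.2 < d then st.1 + (d - st.2) else st.1), d))
      ((0 : Int), (0 : Int))
  if s.2 < 0 then s.1 - s.2 else s.1

-- ===== PRECONDITION & SPEC =====
def Spec_solve (N : Int) (A : List Int) (B : List Int) (out : Int) : Prop := out = solve_alt N A B
instance (N : Int) (A : List Int) (B : List Int) (out : Int) : Decidable (Spec_solve N A B out) := by unfold Spec_solve; infer_instance

-- ===== CLAIM (what is proved, stated in full; the proofs are below) =====
def Claim_equal_solve : Prop := ∀ (N : Int) (A : List Int) (B : List Int), Dom_solve N A B → Spec_solve N A B (solve N A B)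

-- ===== LEMMAS AND PROOFS =====

-- positive variation of a list of diffs, starting from previous value p
def pvo (p : Int) : List Int → Int
  | [] => 0
  | x :: t => (if p < x then x - p else 0) + pvo x t

-- negative variation
def nvo (p : Int) : List Int → Int
  | [] => 0
  | x :: t => (if x < p then p - x else 0) + nvo x t

def lastD (p : Int) : List Int → Int
  | [] => p
  | x :: t => lastD x t

-- closed positive variation: a trailing 0 is padded on
def pvc (p : Int) (l : List Int) : Int :=
  pvo p l + (if lastD p l < 0 then -(lastD p l) else 0)

-- recursive form of pyDedup's tail (p = original previous element)
def dstep (p : Int) : List Int → List Int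
  | [] => []
  | y :: t => if y = p then dstep y t else y :: dstep y t

-- recursive form of pyExtrema's tail (p = original previous element)
def estep (p : Int) : List Int → List Int
  | [] => []
  | [y] => [y]
  | y :: z :: t => if (y - p) * (y - z) > 0 then y :: estep y (z :: t) else estep y (z :: t)

-- recursive form of pyHills
def hill : List Int → Int
  | [] => 0
  | [_] => 0
  | x :: y :: t => (y - x) + hill t

-- strict alternation (true: next step goes up from p, false: down)
inductive Alt : Bool → Int → List Int → Prop
  | nil (b : Bool) (p : Int) : Alt b p []
  | up {p x : Int} {t : List Int} : p < x → Alt false x t → Alt true p (x :: t)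
  | down {p x : Int} {t : List Int} : x < p → Alt true x t → Alt false p (x :: t)

-- a maximal same-signed nonzero run of diffs (possibly empty)
def Block (D : List Int) : Prop := (∀ x ∈ D, 0 < x) ∨ (∀ x ∈ D, x < 0)

def diffs (l : List (Int × Int)) : List Int := l.map (fun ab => ab.2 - ab.1)

-- ---- basic lemmas ----

theorem lastD_mem (p : Int) (l : List Int) (h : l ≠ []) : lastD p l ∈ l := by
  induction l generalizing p with
  | nil => simp at h
  | cons x t ih =>
    cases t with
    | nil => simp [lastD]
    | cons y u => simpa [lastD] using Or.inr (ih x (by simp))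

theorem lastD_eq_getLast (p : Int) (l : List Int) (h : l ≠ []) : lastD p l = l.getLast h := by
  induction l generalizing p with
  | nil => simp at h
  | cons x t ih =>
    cases t with
    | nil => simp [lastD]
    | cons y u => simpa [lastD, List.getLast] using ih x (by simp)

theorem pvo_append (p : Int) (xs ys : List Int) :
    pvo p (xs ++ ys) = pvo p xs + pvo (lastD p xs) ys := by
  induction xs generalizing p with
  | nil => simp [pvo, lastD]
  | cons x t ih => simp [pvo, lastD, ih x]; ring

theorem lastD_append (p : Int) (xs ys : List Int) :
    lastD p (xs ++ ys) = lastD (lastD p xs) ys := by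
  induction xs generalizing p with
  | nil => simp [lastD]
  | cons x t ih => simp [lastD, ih x]

theorem pvo_sub_nvo (p : Int) (l : List Int) : pvo p l - nvo p l = lastD p l - p := by
  induction l generalizing p with
  | nil => simp [pvo, nvo, lastD]
  | cons x t ih =>
    simp only [pvo, nvo, lastD]
    have := ih x
    split_ifs <;> omega

theorem pvo_map_neg (p : Int) (l : List Int) : pvo p (l.map (fun x => -x)) = nvo (-p) l := by
  induction l generalizing p with
  | nil => simp [pvo, nvo]
  | cons x t ih =>
    simp only [List.map_cons, pvo, nvo]
    rw [ih (-x), neg_neg]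
    split_ifs <;> omega

-- splitting pvc at a boundary (zero element, or sign change against the last of D)
theorem pvc_split (D : List Int) (d : Int) (r : List Int)
    (h : d = 0 ∨ d * lastD 0 D < 0) :
    pvc 0 (D ++ d :: r) = pvc 0 D + pvc 0 (d :: r) := by
  simp only [pvc, pvo_append, lastD_append, pvo, lastD]
  rcases h with h | h
  · subst h; split_ifs <;> omega
  · rcases mul_neg_iff.mp h with ⟨h1, h2⟩ | ⟨h1, h2⟩ <;> split_ifs <;> omega

theorem pvc_cons_zero (r : List Int) : pvc 0 (0 :: r) = pvc 0 r := by
  simp [pvc, pvo, lastD]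

-- ---- dedup lemmas ----

theorem pvo_dstep (p : Int) (l : List Int) : pvo p (dstep p l) = pvo p l := by
  induction l generalizing p with
  | nil => rfl
  | cons y t ih =>
    by_cases h : y = p
    · subst h; simp [dstep, pvo, ih y]
    · simp [dstep, h, pvo, ih y]

theorem chain_dstep (p : Int) (l : List Int) : List.IsChain (· ≠ ·) (p :: dstep p l) := by
  induction l generalizing p with
  | nil => simp [dstep]
  | cons y t ih =>
    by_cases h : y = p
    · subst h; simpa [dstep] using ih y
    · simp only [dstep, if_neg h]
      exact List.IsChain.cons_cons (fun heq => h heq.symm) (ih y)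

-- ---- extrema lemmas ----

-- removing interior non-extrema preserves positive variation
theorem pvo_estep (l : List Int) : ∀ p q y, List.IsChain (· ≠ ·) (y :: l) →
    ((p ≤ q ∧ q ≤ y) ∨ (y ≤ q ∧ q ≤ p)) → q ≠ y →
    pvo p (estep q (y :: l)) = pvo p (y :: l) := by
  induction l with
  | nil => intro p q y _ _ _; rfl
  | cons z t ih =>
    intro p q y hch hb hq
    have hyz : y ≠ z := (List.isChain_cons_cons.mp hch).1
    have hch' : List.IsChain (· ≠ ·) (z :: t) := (List.isChain_cons_cons.mp hch).2
    by_cases hk : (y - q) * (y - z) > 0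
    · simp only [estep, if_pos hk, pvo]
      rw [ih y y z hch' (by omega) hyz]
      simp [pvo]
    · simp only [estep, if_neg hk]
      have hlt : (y - q) * (y - z) < 0 :=
        lt_of_le_of_ne (not_lt.mp hk) (mul_ne_zero (by omega) (by omega))
      rcases mul_neg_iff.mp hlt with ⟨h1, h2⟩ | ⟨h1, h2⟩
      · -- q < y < z
        rw [ih p y z hch' (by omega) (by omega)]
        simp only [pvo]
        split_ifs <;> omega
      · -- z < y < q
        rw [ih p y z hch' (by omega) (by omega)]
        simp only [pvo]
        split_ifs <;> omega

theorem alt_mono_up (q y : Int) (L : List Int) (h : q ≤ y) (ha : Alt true y L) : Alt true q L := by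
  cases ha with
  | nil => exact Alt.nil _ _
  | up h1 h2 => exact Alt.up (by omega) h2

theorem alt_mono_down (q y : Int) (L : List Int) (h : y ≤ q) (ha : Alt false y L) : Alt false q L := by
  cases ha with
  | nil => exact Alt.nil _ _
  | down h1 h2 => exact Alt.down (by omega) h2

-- estep produces a strictly alternating sequence
theorem alt_estep (l : List Int) : ∀ q y, List.IsChain (· ≠ ·) (y :: l) →
    (q < y → Alt true q (estep q (y :: l))) ∧ (y < q → Alt false q (estep q (y :: l))) := by
  induction l with
  | nil =>
    intro q y _
    exact ⟨fun h => Alt.up h (Alt.nil _ _), fun h => Alt.down h (Alt.nil _ _)⟩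
  | cons z t ih =>
    intro q y hch
    have hyz : y ≠ z := (List.isChain_cons_cons.mp hch).1
    have hch' : List.IsChain (· ≠ ·) (z :: t) := (List.isChain_cons_cons.mp hch).2
    by_cases hk : (y - q) * (y - z) > 0
    · rcases mul_pos_iff.mp hk with ⟨h1, h2⟩ | ⟨h1, h2⟩
      · -- q < y, z < y
        refine ⟨fun h => ?_, fun h => by omega⟩
        simp only [estep, if_pos hk]
        exact Alt.up h ((ih y z hch').2 (by omega))
      · -- y < q, y < z
        refine ⟨fun h => by omega, fun h => ?_⟩
        simp only [estep, if_pos hk]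
        exact Alt.down h ((ih y z hch').1 (by omega))
    · constructor
      · intro h
        have hz : y < z := by
          rcases lt_or_gt_of_ne hyz with h' | h'
          · exact h'
          · exfalso; exact hk (by nlinarith)
        simp only [estep, if_neg hk]
        exact alt_mono_up q y _ (le_of_lt h) ((ih y z hch').1 hz)
      · intro h
        have hz : z < y := by
          rcases lt_or_gt_of_ne hyz with h' | h'
          · exfalso; exact hk (by nlinarith)
          · exact h'
        simp only [estep, if_neg hk]
        exact alt_mono_down q y _ (le_of_lt h) ((ih y z hch').2 hz)

theorem hill_alt (b : Bool) (p : Int) (L : List Int) (h : Alt b p L) :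
    (cond b (hill (p :: L)) (hill L)) = pvo p L := by
  induction h with
  | nil b p => cases b <;> simp [hill, pvo]
  | up h1 h2 ih =>
    simp only [cond_true, cond_false] at ih ⊢
    cases h2 with
    | nil => simp [hill, pvo]; omega
    | down h3 h4 =>
      simp only [hill, pvo] at ih ⊢
      split_ifs <;> omega
  | down h1 h2 ih =>
    simp only [cond_true, cond_false] at ih ⊢
    simp only [pvo]
    split_ifs <;> omega

-- ---- bridges: index comprehensions = structural recursions ----

theorem pyDedup_bridge (xs : List Int) : ∀ (k : Int) (F : List Int) (p : Int),
    1 ≤ k → (∀ j : Nat, PySem.List.pyGetD F (k + (j : Int)) 0 = xs.getD j 0) →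
    PySem.List.pyGetD F (k - 1) 0 = p →
    ((PySem.List.enumerate xs k).filter (dkeep F)).map (fun q => q.2) = dstep p xs := by
  induction xs with
  | nil => intro k F p _ _ _; rfl
  | cons y t ih =>
    intro k F p hk hF hp
    have hk0 : (k == 0) = false := by simp; omega
    have hy : PySem.List.pyGetD F k 0 = y := by
      have := hF 0
      simpa using this
    have hF' : ∀ j : Nat, PySem.List.pyGetD F (k + 1 + (j : Int)) 0 = t.getD j 0 := by
      intro j
      have := hF (j + 1)
      push_cast at this
      rw [show k + 1 + (j : Int) = k + ((j : Int) + 1) by ring]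
      simpa using this
    have hy' : PySem.List.pyGetD F (k + 1 - 1) 0 = y := by simpa using hy
    rw [PySem.List.enumerate_cons, List.filter_cons]
    by_cases h : y = p
    · subst h
      have hpred : dkeep F (k, y) = false := by simp [dkeep, hk0, hp]
      rw [hpred]
      simp only [Bool.false_eq_true, if_false]
      have hds : dstep y (y :: t) = dstep y t := by simp [dstep]
      rw [hds]
      exact ih (k + 1) F y (by omega) hF' hy'
    · have hpred : dkeep F (k, y) = true := by simp [dkeep, hk0, hp, h]
      rw [hpred]
      simp only [if_true]
      have hds : dstep p (y :: t) = y :: dstep y t := by simp [dstep, h]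
      rw [List.map_cons, hds]
      rw [ih (k + 1) F y (by omega) hF' hy']

theorem pyDedup_eq (x : Int) (xs : List Int) : pyDedup (x :: xs) = x :: dstep x xs := by
  unfold pyDedup
  rw [PySem.List.enumerate_cons, List.filter_cons]
  have hpred : dkeep (x :: xs) (0, x) = true := by simp [dkeep]
  rw [hpred]
  simp only [if_true, List.map_cons]
  congr 1
  refine pyDedup_bridge xs 1 (x :: xs) x (by omega) ?_ ?_
  · intro j
    rw [show (1 : Int) + (j : Int) = ((j + 1 : Nat) : Int) by push_cast; ring]
    rw [PySem.List.pyGetD_natCast]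
    simp
  · norm_num

theorem pyExtrema_bridge (xs : List Int) : ∀ (k : Int) (F : List Int) (p : Int),
    1 ≤ k → (k + xs.length = F.length) →
    (∀ j : Nat, j < xs.length → PySem.List.pyGetD F (k + (j : Int)) 0 = xs.getD j 0) →
    PySem.List.pyGetD F (k - 1) 0 = p →
    ((PySem.List.enumerate xs k).filter (ekeep F)).map (fun q => q.2) = estep p xs := by
  induction xs with
  | nil => intro k F p _ _ _ _; rfl
  | cons y t ih =>
    intro k F p hk hlen hF hp
    have hk0 : (k == 0) = false := by simp; omega
    have hy : PySem.List.pyGetD F k 0 = y := by simpa using hF 0 (by simp)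
    rw [PySem.List.enumerate_cons, List.filter_cons]
    cases t with
    | nil =>
      have hpred : ekeep F (k, y) = true := by
        simp only [List.length_cons, List.length_nil] at hlen
        simp [ekeep]; left; right; omega
      rw [hpred]
      rfl
    | cons z u =>
      have hlast : (k == (F.length : Int) - 1) = false := by
        simp only [List.length_cons] at hlen
        rw [beq_eq_false_iff_ne]
        push_cast at hlen ⊢; omega
      have hz : PySem.List.pyGetD F (k + 1) 0 = z := by
        have := hF 1 (by simp)
        simpa using this
      have hF' : ∀ j : Nat, j < (z :: u).length → PySem.List.pyGetD F (k + 1 + (j : Int)) 0 = (z :: u).getD j 0 := by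
        intro j hj
        have := hF (j + 1) (by simpa using Nat.succ_lt_succ hj)
        push_cast at this
        rw [show k + 1 + (j : Int) = k + ((j : Int) + 1) by ring]
        simpa using this
      have hy' : PySem.List.pyGetD F (k + 1 - 1) 0 = y := by simpa using hy
      have hlen' : (k + 1) + (z :: u).length = F.length := by
        simp only [List.length_cons] at hlen ⊢; push_cast at hlen ⊢; omega
      by_cases hcond : (y - p) * (y - z) > 0
      · have hpred : ekeep F (k, y) = true := by simp [ekeep, hk0, hlast, hp, hz, hcond]
        rw [hpred]
        simp only [if_true, List.map_cons]
        have hes : estep p (y :: z :: u) = y :: estep y (z :: u) := by simp [estep, hcond]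
        rw [hes, ih (k + 1) F y (by omega) hlen' hF' hy']
      · have hpred : ekeep F (k, y) = false := by simp [ekeep, hk0, hlast, hp, hz, hcond]
        rw [hpred]
        simp only [Bool.false_eq_true, if_false]
        have hes : estep p (y :: z :: u) = estep y (z :: u) := by simp [estep, hcond]
        rw [hes]
        exact ih (k + 1) F y (by omega) hlen' hF' hy'

theorem pyExtrema_eq (x : Int) (xs : List Int) : pyExtrema (x :: xs) = x :: estep x xs := by
  unfold pyExtrema
  rw [PySem.List.enumerate_cons, List.filter_cons]
  have hpred : ekeep (x :: xs) (0, x) = true := by simp [ekeep]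
  rw [hpred]
  simp only [if_true, List.map_cons]
  congr 1
  refine pyExtrema_bridge xs 1 (x :: xs) x (by omega) (by simp; push_cast; ring) ?_ ?_
  · intro j hj
    rw [show (1 : Int) + (j : Int) = ((j + 1 : Nat) : Int) by push_cast; ring]
    rw [PySem.List.pyGetD_natCast]
    simp
  · norm_num

theorem pyHills_nil : pyHills [] = 0 := by decide

theorem pyHills_one (x : Int) : pyHills [x] = 0 := by
  unfold pyHills
  rw [PySem.List.pyRange_of_pos _ _ (by norm_num : (0:Int) < (2:Int))]
  norm_num

theorem pyHills_cons2 (x y : Int) (t : List Int) :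
    pyHills (x :: y :: t) = (y - x) + pyHills t := by
  unfold pyHills
  rw [PySem.List.foldl_add, PySem.List.foldl_add]
  rw [PySem.List.pyRange_of_pos _ _ (by norm_num : (0:Int) < (2:Int)),
      PySem.List.pyRange_of_pos _ _ (by norm_num : (0:Int) < (2:Int))]
  have hn1 : (if (1:Int) < ((x :: y :: t).length : Int) then ((((x :: y :: t).length : Int) - 1 + 2 - 1) / 2).toNat else 0) = t.length / 2 + 1 := by
    simp only [List.length_cons]
    rw [if_pos (by push_cast; omega)]
    push_cast
    omega
  have hn2 : (if (1:Int) < (t.length : Int) then (((t.length : Int) - 1 + 2 - 1) / 2).toNat else 0) = t.length / 2 := by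
    split_ifs with h
    · omega
    · omega
  rw [hn1, hn2, List.range_succ_eq_map]
  simp only [List.map_cons, List.map_map, List.sum_cons]
  have hterm : ∀ k : Nat,
      PySem.List.pyGetD (x :: y :: t) (1 + 2 * ((k : Int) + 1)) 0 -
        PySem.List.pyGetD (x :: y :: t) (1 + 2 * ((k : Int) + 1) - 1) 0
      = PySem.List.pyGetD t (1 + 2 * (k : Int)) 0 - PySem.List.pyGetD t (1 + 2 * (k : Int) - 1) 0 := by
    intro k
    rw [show (1 : Int) + 2 * ((k : Int) + 1) = ((2 * k + 3 : Nat) : Int) by push_cast; ring]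
    rw [show ((2 * k + 3 : Nat) : Int) - 1 = ((2 * k + 2 : Nat) : Int) by push_cast; ring]
    rw [show (1 : Int) + 2 * (k : Int) = ((2 * k + 1 : Nat) : Int) by push_cast; ring]
    rw [show ((2 * k + 1 : Nat) : Int) - 1 = ((2 * k : Nat) : Int) by push_cast; ring]
    simp only [PySem.List.pyGetD_natCast]
    rw [show 2 * k + 3 = (2 * k + 1) + 1 + 1 by omega,
        show 2 * k + 2 = (2 * k) + 1 + 1 by omega]
    simp [List.getD_cons_succ]
  have hh : ∀ a ∈ List.range (t.length / 2),
      ((fun i => PySem.List.pyGetD (x :: y :: t) i 0 - PySem.List.pyGetD (x :: y :: t) (i - 1) 0) ∘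
        (fun k : Nat => 1 + 2 * (k : Int)) ∘ Nat.succ) a
      = ((fun i => PySem.List.pyGetD t i 0 - PySem.List.pyGetD t (i - 1) 0) ∘
        (fun k : Nat => 1 + 2 * (k : Int))) a := by
    intro a _
    simp only [Function.comp_apply, Nat.succ_eq_add_one]
    rw [show ((a + 1 : Nat) : Int) = (a : Int) + 1 by push_cast; ring]
    exact hterm a
  rw [List.map_congr_left hh]
  have h1 : PySem.List.pyGetD (x :: y :: t) (1 + 2 * ((0 : Nat) : Int)) 0 -
      PySem.List.pyGetD (x :: y :: t) (1 + 2 * ((0 : Nat) : Int) - 1) 0 = y - x := by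
    norm_num [List.getD, PySem.List.pyGetD_ofNat']
  rw [h1]
  ring

theorem pyHills_eq_hill (E : List Int) : pyHills E = hill E := by
  induction E using hill.induct with
  | case1 => exact pyHills_nil
  | case2 x => exact pyHills_one x
  | case3 x y t ih => rw [pyHills_cons2, ih, hill]

-- ---- per-block equality: solveBlock D = pvc 0 D for same-signed nonzero blocks ----

theorem block_nonzero (D : List Int) (h : Block D) : ∀ x ∈ D, x ≠ 0 := by
  intro x hx
  rcases h with h | h
  · have := h x hx; omega
  · have := h x hx; omega

theorem solveBlock_eq (D : List Int) (h : Block D) : solveBlock D = pvc 0 D := by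
  cases D with
  | nil => simp [solveBlock, pvc, pvo, lastD]
  | cons x xs =>
    have hx0 : x ≠ 0 := block_nonzero _ h x (by simp)
    have habs : (0 : Int) < |x| := abs_pos.mpr hx0
    unfold solveBlock
    rw [if_neg (by simp)]
    have e1 : ([0] ++ (x :: xs).map (fun d => |d|)) = 0 :: |x| :: xs.map (fun d => |d|) := by simp
    rw [e1, pyDedup_eq]
    have e2 : dstep 0 (|x| :: xs.map (fun d => |d|)) = |x| :: dstep |x| (xs.map (fun d => |d|)) := by
      simp [dstep, show |x| ≠ 0 by omega]
    rw [e2, pyExtrema_eq, pyHills_eq_hill]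
    set rest := dstep |x| (xs.map (fun d => |d|)) with hrest
    -- chain property of the deduped list
    have hch : List.IsChain (· ≠ ·) (|x| :: rest) := by
      have := chain_dstep 0 (|x| :: xs.map (fun d => |d|))
      rw [e2] at this
      exact this.of_cons
    -- alternation of the extrema list
    have halt : Alt true 0 (estep 0 (|x| :: rest)) :=
      (alt_estep rest 0 |x| hch).1 habs
    have h6 := hill_alt true 0 _ halt
    simp only [cond_true] at h6
    rw [h6]
    rw [pvo_estep rest 0 0 |x| hch (Or.inl ⟨le_refl 0, le_of_lt habs⟩) (by omega)]
    have h8 : pvo 0 (|x| :: rest) = pvo 0 ((x :: xs).map (fun d => |d|)) := by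
      have := pvo_dstep 0 (|x| :: xs.map (fun d => |d|))
      rw [e2] at this
      simpa using this
    rw [h8]
    -- pvo of the abs list equals pvc of the signed block
    rcases h with hpos | hneg
    · have habsid : (x :: xs).map (fun d => |d|) = x :: xs := by
        simpa using List.map_congr_left (fun d hd => abs_of_pos (hpos d hd))
      rw [habsid]
      have hlast : 0 < lastD 0 (x :: xs) := hpos _ (lastD_mem 0 (x :: xs) (by simp))
      simp [pvc, if_neg (by omega : ¬ lastD 0 (x :: xs) < 0)]
    · have habsneg : (x :: xs).map (fun d => |d|) = (x :: xs).map (fun v => -v) :=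
        List.map_congr_left (fun d hd => abs_of_neg (hneg d hd))
      rw [habsneg, pvo_map_neg, neg_zero]
      have hsub := pvo_sub_nvo 0 (x :: xs)
      have hlast : lastD 0 (x :: xs) < 0 := hneg _ (lastD_mem 0 (x :: xs) (by simp))
      simp only [pvc, if_pos hlast]
      omega

-- ---- loop invariants ----

theorem solveA_loop (l : List (Int × Int)) : ∀ (res : Int) (D : List Int), Block D →
    (l.foldl stepA (res, D)).1 + solveBlock ((l.foldl stepA (res, D)).2)
      = res + pvc 0 (D ++ diffs l) := by
  induction l with
  | nil =>
    intro res D hD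
    simp only [List.foldl_nil, diffs, List.map_nil, List.append_nil]
    rw [solveBlock_eq D hD]
  | cons ab t ih =>
    intro res D hD
    have hdiffs : diffs (ab :: t) = (ab.2 - ab.1) :: diffs t := rfl
    rw [List.foldl_cons]
    by_cases hd : ab.2 - ab.1 = 0
    · -- close the block, do not append
      have hstep : stepA (res, D) ab = (res + solveBlock D, []) := by
        simp [stepA, hd]
      rw [hstep, ih (res + solveBlock D) [] (Or.inl (by simp))]
      rw [solveBlock_eq D hD, hdiffs, hd]
      rw [pvc_split D 0 (diffs t) (Or.inl rfl), pvc_cons_zero]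
      simp [add_assoc]
    · by_cases hsg : D ≠ [] ∧ (ab.2 - ab.1) * PySem.List.pyGetD D (-1) 0 < 0
      · -- sign change: close the block, start a new block [d]
        have hstep : stepA (res, D) ab = (res + solveBlock D, [ab.2 - ab.1]) := by
          simp only [stepA]
          rw [if_pos (Or.inr hsg), if_pos hd]
          rfl
        rw [hstep, ih (res + solveBlock D) [ab.2 - ab.1]
            (by rcases lt_or_gt_of_ne hd with h | h
                · right; intro z hz; simp at hz; omega
                · left; intro z hz; simp at hz; omega)]
        rw [solveBlock_eq D hD, hdiffs]
        have hlast : (ab.2 - ab.1) * lastD 0 D < 0 := by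
          rcases hsg with ⟨hne, hlt⟩
          rwa [PySem.List.pyGetD_neg_one D 0 hne, ← lastD_eq_getLast 0 D hne] at hlt
        rw [pvc_split D (ab.2 - ab.1) (diffs t) (Or.inr hlast)]
        simp [add_assoc]
      · -- extend the block
        have hcond : ¬ (ab.2 - ab.1 = 0 ∨ (D ≠ [] ∧ (ab.2 - ab.1) * PySem.List.pyGetD D (-1) 0 < 0)) := by
          push_neg
          refine ⟨hd, fun hne => ?_⟩
          push_neg at hsg
          exact hsg hne
        have hstep : stepA (res, D) ab = (res, D ++ [ab.2 - ab.1]) := by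
          simp only [stepA]
          rw [if_neg hcond, if_pos hd]
        have hblk : Block (D ++ [ab.2 - ab.1]) := by
          push_neg at hsg
          cases D with
          | nil =>
            rcases lt_or_gt_of_ne hd with h | h
            · right; intro z hz; simp at hz; omega
            · left; intro z hz; simp at hz; omega
          | cons w ws =>
            have hne : (w :: ws : List Int) ≠ [] := by simp
            have hge : 0 ≤ (ab.2 - ab.1) * lastD 0 (w :: ws) := by
              have := hsg hne
              rwa [PySem.List.pyGetD_neg_one _ 0 hne, ← lastD_eq_getLast 0 _ hne] at this
            have hmem := lastD_mem 0 (w :: ws) hne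
            rcases hD with hpos | hneg
            · have hl : 0 < lastD 0 (w :: ws) := hpos _ hmem
              have hdp : 0 < ab.2 - ab.1 := by
                rcases lt_or_gt_of_ne hd with h | h
                · exact absurd hge (not_le.mpr (mul_neg_of_neg_of_pos h hl))
                · exact h
              left
              intro z hz
              rcases List.mem_append.mp hz with hz | hz
              · exact hpos z hz
              · simp at hz; omega
            · have hl : lastD 0 (w :: ws) < 0 := hneg _ hmem
              have hdp : ab.2 - ab.1 < 0 := by
                rcases lt_or_gt_of_ne hd with h | h
                · exact h
                · exact absurd hge (not_le.mpr (mul_neg_of_pos_of_neg h hl))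
              right
              intro z hz
              rcases List.mem_append.mp hz with hz | hz
              · exact hneg z hz
              · simp at hz; omega
        rw [hstep, ih res (D ++ [ab.2 - ab.1]) hblk]
        rw [hdiffs, List.append_assoc]
        rfl

theorem solveB_loop (l : List (Int × Int)) : ∀ (res prev : Int),
    l.foldl (fun (st : Int × Int) ab =>
        let d := ab.2 - ab.1
        ((if st.2 < d then st.1 + (d - st.2) else st.1), d)) (res, prev)
      = (res + pvo prev (diffs l), lastD prev (diffs l)) := by
  induction l with
  | nil => intro res prev; simp [diffs, pvo, lastD]
  | cons ab t ih =>
    intro res prev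
    simp only [List.foldl_cons, diffs, List.map_cons, pvo, lastD] at *
    rw [ih]
    split_ifs <;> simp <;> omega

-- ===== VERDICT (by name: the statement is the Claim_ definition above) =====
theorem solve_spec : Claim_equal_solve := by
  intro N A B _
  unfold Spec_solve solve solve_alt
  have hA := solveA_loop (List.zip A B) 0 [] (Or.inl (by simp))
  have hB := solveB_loop (List.zip A B) 0 0
  simp only [List.nil_append] at hA
  simp only [hA, hB]
  simp only [pvc]
  split_ifs <;> omega
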